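-- pv_equiv track=rewrite | github.com/danni2019/starSling | scripts/check_contract_mapping_consistency.py | _option_contract_cp_index
-- ===== SOURCE A (Python) =====
-- from typing import Dict, Iterable, List, Optional, Tuple
--
-- def _sanitize_text(value: object) -> Optional[str]:
--     if value is None:
--         return None
--     text = str(value).strip()
--     return text if text else None
--
-- def _option_contract_cp_index(contract: object) -> int:
--     token = _sanitize_text(contract)
--     if token is None:
--         return -1
--     upper = token.upper()
--     if len(upper) < 3:
--         return -1
--     idx = upper.rfind("-C-")
--     if idx > 0:
--         return idx + 1
--     idx = upper.rfind("-P-")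
--     if idx > 0:
--         return idx + 1
--     for i in range(len(upper) - 2, 0, -1):
--         ch = upper[i]
--         if ch not in ("C", "P"):
--             continue
--         suffix = upper[i + 1 :]
--         if not suffix or not suffix.isdigit():
--             continue
--         prefix = upper[:i]
--         if not any(c.isdigit() for c in prefix):
--             continue
--         return i
--     return -1
-- ===== SOURCE B (Python) =====
-- def _option_contract_cp_index(contract):
--     if contract is None:
--         return -1
--     token = str(contract).strip()
--     if len(token) < 3:
--         return -1
--     u = token.upper()
--     idx = u.rfind("-C-")
--     if idx <= 0:
--         idx = u.rfind("-P-")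
--     if idx > 0:
--         return idx + 1
--     # the only index A's quadratic scan can accept is the position just
--     # before the maximal trailing digit run: find it directly in O(n)
--     n = len(u)
--     j = n
--     while j > 0 and u[j - 1].isdigit():
--         j -= 1
--     if j == n or j < 2 or u[j - 1] not in ("C", "P"):
--         return -1
--     return j - 1 if any(c.isdigit() for c in u[: j - 1]) else -1
-- ===== Notes on version B (the rewrite author's own statement) =====
-- stated objective: faster
-- what changed: A's backwards scan re-checks a full digit-suffix and digit-prefix for every position (O(n^2)); B finds the start j of the maximal trailing digit run in one pass and checks the single possible split position j-1 (O(n)).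
import Mathlib
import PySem

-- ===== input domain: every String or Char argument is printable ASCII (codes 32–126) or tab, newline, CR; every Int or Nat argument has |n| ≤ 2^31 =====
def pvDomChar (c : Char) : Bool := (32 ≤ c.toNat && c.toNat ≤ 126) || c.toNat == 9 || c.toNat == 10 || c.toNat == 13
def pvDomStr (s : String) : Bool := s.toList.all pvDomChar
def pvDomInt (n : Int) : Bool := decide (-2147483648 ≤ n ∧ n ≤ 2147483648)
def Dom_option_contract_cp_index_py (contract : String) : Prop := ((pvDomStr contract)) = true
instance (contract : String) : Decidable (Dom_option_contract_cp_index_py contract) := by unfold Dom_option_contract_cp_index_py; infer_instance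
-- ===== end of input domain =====

-- B replaces A's quadratic backwards scan (for each i: re-check the whole suffix
-- and prefix) by one O(n) pass: only the position just before the maximal
-- trailing digit run can succeed, so B locates that run and checks one candidate.

-- ===== PORT A =====
-- the body of A's for-loop for one index i (each failed check 'continue's, i.e. yields false);
-- upper[i] is ported as pyGet? + getD: the loop only visits in-range i (1 ≤ i ≤ len-2)
def pvCondA (u : List Char) (i : Int) : Bool :=
  let ch := (PySem.List.pyGet? u i).getD ' '
  if ch ≠ 'C' ∧ ch ≠ 'P' then false
  else
    let suffix := PySem.List.slice u (some (i + 1)) none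
    if suffix.isEmpty ∨ PySem.Chars.strIsdigit suffix = false then false
    else
      let pre := PySem.List.slice u none (some i)
      pre.any PySem.Chars.isdigit

-- 'for i in range(len(upper)-2, 0, -1): … return i … ' / fall through to 'return -1'
def pvLoopA (u : List Char) : List Int → Int
  | [] => -1
  | i :: rest => if pvCondA u i then i else pvLoopA u rest

def option_contract_cp_index_py (contract : String) : Int :=
  -- _sanitize_text: contract is a str here, so only strip + emptiness matter
  let token := PySem.Chars.strip contract.toList
  if token.isEmpty then -1
  else
    let upper := PySem.Chars.upper token
    if upper.length < 3 then -1
    else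
      let idx := PySem.Chars.rfind upper "-C-".toList
      if idx > 0 then idx + 1
      else
        let idx := PySem.Chars.rfind upper "-P-".toList
        if idx > 0 then idx + 1
        else pvLoopA upper (PySem.List.pyRange ((upper.length : Int) - 2) 0 (-1))

-- ===== PORT B =====
-- 'j = n; while j > 0 and u[j-1].isdigit(): j -= 1'  (start of the maximal trailing digit run)
def pvTrailStart (u : List Char) : Nat → Nat
  | 0 => 0
  | k + 1 => if PySem.Chars.isdigit (u.getD k ' ') then pvTrailStart u k else k + 1

def option_contract_cp_index_py_alt (contract : String) : Int :=
  let token := PySem.Chars.strip contract.toList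
  if token.length < 3 then -1
  else
    let u := PySem.Chars.upper token
    let idxC := PySem.Chars.rfind u "-C-".toList
    let idx := if idxC ≤ 0 then PySem.Chars.rfind u "-P-".toList else idxC
    if idx > 0 then idx + 1
    else
      let n := u.length
      let j := pvTrailStart u n
      if j = n ∨ j < 2 ∨ (u.getD (j - 1) ' ' ≠ 'C' ∧ u.getD (j - 1) ' ' ≠ 'P') then -1
      else if (u.take (j - 1)).any PySem.Chars.isdigit then ((j : Int) - 1) else -1

-- ===== PRECONDITION & SPEC =====
def Spec_option_contract_cp_index_py (contract : String) (out : Int) : Prop := out = option_contract_cp_index_py_alt contract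
instance (contract : String) (out : Int) : Decidable (Spec_option_contract_cp_index_py contract out) := by unfold Spec_option_contract_cp_index_py; infer_instance

-- ===== CLAIM (what is proved, stated in full; the proofs are below) =====
def Claim_equal_option_contract_cp_index_py : Prop := ∀ (contract : String), Dom_option_contract_cp_index_py contract → Spec_option_contract_cp_index_py contract (option_contract_cp_index_py contract)

-- ===== LEMMAS AND PROOFS =====


-- trailing-digit-run facts for pvTrailStart
lemma pvTrail_le (u : List Char) (k : Nat) : pvTrailStart u k ≤ k := by
  induction k with
  | zero => simp [pvTrailStart]
  | succ m ih => unfold pvTrailStart; split <;> omega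

lemma pvTrail_digits (u : List Char) (k : Nat) :
    ∀ m : Nat, pvTrailStart u k ≤ m → m < k → PySem.Chars.isdigit (u.getD m ' ') = true := by
  induction k with
  | zero => omega
  | succ n ih =>
    intro m h1 h2
    unfold pvTrailStart at h1
    split at h1
    · rcases Nat.lt_or_ge m n with h | h
      · exact ih m h1 h
      · have : m = n := by omega
        subst this; assumption
    · omega

lemma pvTrail_stop (u : List Char) (k : Nat) (h : 0 < pvTrailStart u k) :
    PySem.Chars.isdigit (u.getD (pvTrailStart u k - 1) ' ') = false := by
  induction k with
  | zero => simp [pvTrailStart] at h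
  | succ n ih =>
    unfold pvTrailStart at h ⊢
    split at h
    · rename_i hd; rw [if_pos hd]; exact ih h
    · rename_i hd; rw [if_neg hd]; simpa using hd

-- `(u.drop m).all isdigit` holds exactly from the start of the maximal trailing digit run on
lemma pvDropAll_iff (u : List Char) (m : Nat) (hm : m ≤ u.length) :
    ((u.drop m).all PySem.Chars.isdigit = true) ↔ pvTrailStart u u.length ≤ m := by
  constructor
  · intro hall
    by_contra hlt
    push_neg at hlt
    have hj0 : 0 < pvTrailStart u u.length := by omega
    have hjle : pvTrailStart u u.length ≤ u.length := pvTrail_le u u.length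
    have hidx : pvTrailStart u u.length - 1 - m < (u.drop m).length := by simp; omega
    have hmem : (u.drop m)[pvTrailStart u u.length - 1 - m] ∈ u.drop m := List.getElem_mem hidx
    have hval : (u.drop m)[pvTrailStart u u.length - 1 - m] = u.getD (pvTrailStart u u.length - 1) ' ' := by
      rw [List.getElem_drop]
      rw [List.getD_eq_getElem u ' ' (by omega)]
      congr 1; omega
    have := List.all_eq_true.mp hall _ hmem
    rw [hval, pvTrail_stop u u.length hj0] at this
    exact absurd this (by simp)
  · intro hle
    rw [List.all_eq_true]
    intro x hx
    rcases List.mem_iff_getElem.mp hx with ⟨k, hk, hval⟩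
    rw [List.getElem_drop] at hval
    have hlen : m + k < u.length := by
      have := hk; simp at this; omega
    have hdig := pvTrail_digits u u.length (m + k) (by omega) hlen
    rw [List.getD_eq_getElem u ' ' hlen, hval] at hdig
    exact hdig

-- what A's loop body accepts, for an in-range index
lemma pvCondA_true_iff (u : List Char) (i : Nat) (h2 : i + 2 ≤ u.length) :
    pvCondA u (i : Int) = true ↔
      ((u.getD i ' ' = 'C' ∨ u.getD i ' ' = 'P') ∧
       (u.drop (i + 1)).all PySem.Chars.isdigit = true ∧
       (u.take i).any PySem.Chars.isdigit = true) := by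
  have hcast1 : (i : Int) + 1 = ((i + 1 : Nat) : Int) := by push_cast; ring
  have hget : (PySem.List.pyGet? u (i : Int)).getD ' ' = u.getD i ' ' := by
    rw [PySem.List.pyGet?_natCast]; rfl
  have hne : (u.drop (i + 1)).isEmpty = false := by
    simp [List.drop_eq_nil_iff]; omega
  unfold pvCondA
  rw [hget, hcast1, PySem.List.slice_from_natCast, PySem.List.slice_to_natCast]
  by_cases hC : u.getD i ' ' = 'C' <;> by_cases hP : u.getD i ' ' = 'P' <;>
    by_cases hall : (u.drop (i + 1)).all PySem.Chars.isdigit = true <;>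
      simp [PySem.Chars.strIsdigit, hne, hC, hP, hall]

-- only the position just before the trailing digit run can be accepted
lemma pvCondA_candidate (u : List Char) (i : Nat) (h1 : 0 < i) (h2 : i + 2 ≤ u.length)
    (hc : pvCondA u (i : Int) = true) : i + 1 = pvTrailStart u u.length := by
  rw [pvCondA_true_iff u i h2] at hc
  obtain ⟨hcp, hall, -⟩ := hc
  have hub : pvTrailStart u u.length ≤ i + 1 := (pvDropAll_iff u (i + 1) (by omega)).mp hall
  by_contra hne
  have hji : pvTrailStart u u.length ≤ i := by omega
  have hdig := pvTrail_digits u u.length i hji (by omega)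
  rcases hcp with h | h <;> rw [h] at hdig <;> simp [PySem.Chars.isdigit] at hdig

-- A's descending loop when no index is accepted
lemma pvLoopA_none (u : List Char) (a : Nat)
    (h : ∀ i : Nat, 0 < i → i ≤ a → pvCondA u (i : Int) = false) :
    pvLoopA u (PySem.List.pyRange (a : Int) 0 (-1)) = -1 := by
  induction a with
  | zero => rw [PySem.List.pyRange_neg_one_eq_nil (by simp)]; rfl
  | succ k ih =>
    rw [PySem.List.pyRange_neg_one_cons (by positivity)]
    have hstep : ((k + 1 : Nat) : Int) - 1 = (k : Int) := by push_cast; ring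
    rw [hstep]
    unfold pvLoopA
    rw [h (k + 1) (by omega) le_rfl]
    exact ih (fun i hi1 hi2 => h i hi1 (by omega))

-- A's descending loop finds the highest accepted index
lemma pvLoopA_found (u : List Char) (a i0 : Nat) (h0 : 0 < i0) (hle : i0 ≤ a)
    (hc : pvCondA u (i0 : Int) = true)
    (h : ∀ i : Nat, i0 < i → i ≤ a → pvCondA u (i : Int) = false) :
    pvLoopA u (PySem.List.pyRange (a : Int) 0 (-1)) = (i0 : Int) := by
  induction a with
  | zero => omega
  | succ k ih =>
    rw [PySem.List.pyRange_neg_one_cons (by positivity)]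
    have hstep : ((k + 1 : Nat) : Int) - 1 = (k : Int) := by push_cast; ring
    rw [hstep]
    unfold pvLoopA
    by_cases hi : i0 = k + 1
    · subst hi; rw [hc]; simp
    · rw [h (k + 1) (by omega) le_rfl]
      exact ih (by omega) (fun i hi1 hi2 => h i hi1 (by omega))

-- the whole fallback: A's quadratic scan equals B's single-candidate check
lemma pvFallback (u : List Char) (h3 : 3 ≤ u.length) :
    pvLoopA u (PySem.List.pyRange ((u.length : Int) - 2) 0 (-1)) =
      (if pvTrailStart u u.length = u.length ∨ pvTrailStart u u.length < 2 ∨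
          (u.getD (pvTrailStart u u.length - 1) ' ' ≠ 'C' ∧
           u.getD (pvTrailStart u u.length - 1) ' ' ≠ 'P') then -1
       else if (u.take (pvTrailStart u u.length - 1)).any PySem.Chars.isdigit then
         ((pvTrailStart u u.length : Int) - 1)
       else -1) := by
  have hjn : pvTrailStart u u.length ≤ u.length := pvTrail_le u u.length
  have hcast : ((u.length : Int) - 2) = ((u.length - 2 : Nat) : Int) := by push_cast; omega
  rw [hcast]
  by_cases hmain : pvTrailStart u u.length = u.length ∨ pvTrailStart u u.length < 2 ∨
      (u.getD (pvTrailStart u u.length - 1) ' ' ≠ 'C' ∧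
       u.getD (pvTrailStart u u.length - 1) ' ' ≠ 'P')
  · rw [if_pos hmain]
    apply pvLoopA_none
    intro i hi1 hi2
    rw [Bool.eq_false_iff]
    intro hc
    have hcand := pvCondA_candidate u i hi1 (by omega) hc
    rw [pvCondA_true_iff u i (by omega)] at hc
    rcases hmain with h | h | h
    · omega
    · omega
    · have : i = pvTrailStart u u.length - 1 := by omega
      rw [this] at hc
      exact absurd hc.1 (by tauto)
  · rw [if_neg hmain]
    push_neg at hmain
    obtain ⟨hjne, hj2, hcp⟩ := hmain
    have hcp' : u.getD (pvTrailStart u u.length - 1) ' ' = 'C' ∨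
        u.getD (pvTrailStart u u.length - 1) ' ' = 'P' := by tauto
    have hrest : ∀ i : Nat, pvTrailStart u u.length - 1 < i → i ≤ u.length - 2 →
        pvCondA u (i : Int) = false := by
      intro i hi1 hi2
      rw [Bool.eq_false_iff]
      intro hc
      have := pvCondA_candidate u i (by omega) (by omega) hc
      omega
    by_cases hpre : (u.take (pvTrailStart u u.length - 1)).any PySem.Chars.isdigit = true
    · rw [if_pos hpre]
      have hcj : pvCondA u ((pvTrailStart u u.length - 1 : Nat) : Int) = true := by
        rw [pvCondA_true_iff u (pvTrailStart u u.length - 1) (by omega)]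
        refine ⟨hcp', ?_, hpre⟩
        rw [show pvTrailStart u u.length - 1 + 1 = pvTrailStart u u.length by omega]
        exact (pvDropAll_iff u (pvTrailStart u u.length) hjn).mpr le_rfl
      rw [pvLoopA_found u (u.length - 2) (pvTrailStart u u.length - 1) (by omega) (by omega) hcj hrest]
      push_cast; omega
    · rw [if_neg hpre]
      apply pvLoopA_none
      intro i hi1 hi2
      rcases Nat.lt_trichotomy i (pvTrailStart u u.length - 1) with h | h | h
      · rw [Bool.eq_false_iff]
        intro hc
        have := pvCondA_candidate u i hi1 (by omega) hc
        omega
      · rw [Bool.eq_false_iff]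
        intro hc
        rw [pvCondA_true_iff u i (by omega)] at hc
        rw [h] at hc
        exact hpre hc.2.2
      · exact hrest i h hi2

theorem option_contract_cp_index_py_main (contract : String) :
    option_contract_cp_index_py contract = option_contract_cp_index_py_alt contract := by
  unfold option_contract_cp_index_py option_contract_cp_index_py_alt
  dsimp only
  have hlen : (PySem.Chars.upper (PySem.Chars.strip contract.toList)).length =
      (PySem.Chars.strip contract.toList).length := by simp [PySem.Chars.upper]
  by_cases hemp : (PySem.Chars.strip contract.toList).isEmpty
  · rw [if_pos hemp, if_pos (by rw [List.isEmpty_iff] at hemp; simp [hemp])]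
  · rw [if_neg hemp]
    by_cases h3 : (PySem.Chars.upper (PySem.Chars.strip contract.toList)).length < 3
    · rw [if_pos h3, if_pos (show (PySem.Chars.strip contract.toList).length < 3 by omega)]
    · rw [if_neg h3, if_neg (show ¬ (PySem.Chars.strip contract.toList).length < 3 by omega)]
      by_cases hc1 : PySem.Chars.rfind (PySem.Chars.upper (PySem.Chars.strip contract.toList)) "-C-".toList > 0
      · rw [if_pos hc1, if_neg (show ¬ PySem.Chars.rfind (PySem.Chars.upper (PySem.Chars.strip contract.toList)) "-C-".toList ≤ 0 by omega), if_pos hc1]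
      · rw [if_neg hc1, if_pos (show PySem.Chars.rfind (PySem.Chars.upper (PySem.Chars.strip contract.toList)) "-C-".toList ≤ 0 by omega)]
        by_cases hc2 : PySem.Chars.rfind (PySem.Chars.upper (PySem.Chars.strip contract.toList)) "-P-".toList > 0
        · rw [if_pos hc2, if_pos hc2]
        · rw [if_neg hc2, if_neg hc2]
          exact pvFallback (PySem.Chars.upper (PySem.Chars.strip contract.toList)) (by omega)

-- ===== VERDICT (by name: the statement is the Claim_ definition above) =====
theorem option_contract_cp_index_py_spec : Claim_equal_option_contract_cp_index_py := by
  intro contract _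
  unfold Spec_option_contract_cp_index_py
  exact option_contract_cp_index_py_main contract
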